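-- pv_equiv track=rewrite | github.com/russellmiller49/Procedure_suite | modules/coder/domain_rules/registry_to_cpt/coding_rules.py | _lobe_tokens
-- ===== SOURCE A (Python) =====
-- def _lobe_tokens(values: list[str]) -> set[str]:
--     lobes: set[str] = set()
--     for value in values:
--         upper = value.upper()
--         for token in ("RUL", "RML", "RLL", "LUL", "LLL", "LINGULA"):
--             if token in upper:
--                 lobes.add("Lingula" if token == "LINGULA" else token)
--     return lobes
-- ===== SOURCE B (Python) =====
-- def _lobe_tokens(values: list[str]) -> set[str]:
--     # Worklist algorithm: keep a shrinking list of tokens not yet found; per value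
--     # emit the hits (in worklist order), drop them from the worklist, and stop as
--     # soon as every token has been found; rename LINGULA in a final pass.
--     remaining = ["RUL", "RML", "RLL", "LUL", "LLL", "LINGULA"]
--     out = []
--     for value in values:
--         upper = value.upper()
--         hit = [t for t in remaining if t in upper]
--         remaining = [t for t in remaining if t not in upper]
--         out += hit
--         if not remaining:
--             break
--     return {"Lingula" if t == "LINGULA" else t for t in out}
-- ===== Notes on version B (the rewrite author's own statement) =====
-- stated objective: alternative
-- what changed: A accumulates found lobes into a set, re-testing all six tokens against every value and deduplicating via set membership; B instead maintains a shrinking worklist of not-yet-found tokens, emits per value the worklist hits in order (no dedup needed), stops early once the worklist is empty, and applies the LINGULA->Lingula rename in a final pass.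
import Mathlib
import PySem

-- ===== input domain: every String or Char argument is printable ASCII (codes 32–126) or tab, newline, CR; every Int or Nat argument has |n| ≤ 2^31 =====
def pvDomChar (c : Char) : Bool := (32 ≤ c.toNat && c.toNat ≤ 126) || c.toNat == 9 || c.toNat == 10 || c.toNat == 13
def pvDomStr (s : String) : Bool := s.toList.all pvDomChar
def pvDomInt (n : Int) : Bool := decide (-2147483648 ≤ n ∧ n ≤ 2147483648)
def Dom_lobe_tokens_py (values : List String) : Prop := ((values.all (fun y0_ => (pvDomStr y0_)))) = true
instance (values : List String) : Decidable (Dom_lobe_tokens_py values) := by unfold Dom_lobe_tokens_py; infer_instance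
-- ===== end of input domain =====

-- B replaces A's accumulate-into-a-set-with-dedup loops by a shrinking worklist of
-- not-yet-found tokens with early exit and a final rename pass (objective: alternative).

-- ===== PORT A =====
def lobe_tokens_py (values : List String) : List String :=
  values.foldl (fun lobes value =>
    let upper := PySem.Str.upper value
    (["RUL", "RML", "RLL", "LUL", "LLL", "LINGULA"]).foldl (fun lobes token =>
      if PySem.Str.isIn token upper then
        PySem.Set.add lobes (if token == "LINGULA" then "Lingula" else token)
      else lobes) lobes) []

-- ===== PORT B =====
def lobeWorklist : List String := ["RUL", "RML", "RLL", "LUL", "LLL", "LINGULA"]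

def lobeLoop : List String → List String → List String → List String
  | _, out, [] => out
  | remaining, out, value :: vs =>
    let upper := PySem.Str.upper value
    let hit := remaining.filter (fun t => PySem.Str.isIn t upper)
    let remaining' := remaining.filter (fun t => !(PySem.Str.isIn t upper))
    let out' := out ++ hit
    if remaining' = [] then out' else lobeLoop remaining' out' vs

def lobe_tokens_py_alt (values : List String) : List String :=
  PySem.Set.ofList ((lobeLoop lobeWorklist [] values).map
    (fun t => if t == "LINGULA" then "Lingula" else t))

-- ===== PRECONDITION & SPEC =====
def Spec_lobe_tokens_py (values : List String) (out : List String) : Prop := out = lobe_tokens_py_alt values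
instance (values : List String) (out : List String) : Decidable (Spec_lobe_tokens_py values out) := by unfold Spec_lobe_tokens_py; infer_instance

-- ===== CLAIM (what is proved, stated in full; the proofs are below) =====
def Claim_equal_lobe_tokens_py : Prop := ∀ (values : List String), Dom_lobe_tokens_py values → Spec_lobe_tokens_py values (lobe_tokens_py values)

-- ===== LEMMAS AND PROOFS =====

-- the LINGULA → Lingula display rename (definitionally the inline ifs of both ports)
def nmF (t : String) : String := if t == "LINGULA" then "Lingula" else t

-- A's inner token loop appends, in order, the renamed tokens found in u and not yet present
theorem inner_char (u : String) (f : String → String) :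
    ∀ (ts s : List String), (ts.map f).Nodup →
    ts.foldl (fun l t => if PySem.Str.isIn t u then PySem.Set.add l (f t) else l) s
      = s ++ (ts.filter (fun t => PySem.Str.isIn t u && !(s.contains (f t)))).map f := by
  intro ts
  induction ts with
  | nil => intro s _; simp
  | cons t ts ih =>
    intro s hnd
    simp only [List.map_cons, List.nodup_cons] at hnd
    obtain ⟨hft, hnd'⟩ := hnd
    simp only [List.foldl_cons, List.filter_cons]
    by_cases hin : PySem.Str.isIn t u
    · by_cases hc : f t ∈ s
      · have hadd : PySem.Set.add s (f t) = s := by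
          simp [PySem.Set.add, PySem.Set.contains, List.contains_eq_mem, hc]
        rw [if_pos hin, hadd, ih s hnd']
        have hin' : PySem.Chars.isIn t.toList u.toList = true := hin
        simp [hin', hc]
      · have hadd : PySem.Set.add s (f t) = s ++ [f t] := by
          simp [PySem.Set.add, PySem.Set.contains, List.contains_eq_mem, hc]
        rw [if_pos hin, hadd, ih (s ++ [f t]) hnd']
        have hfc : ∀ t' ∈ ts, (PySem.Str.isIn t' u && !((s ++ [f t]).contains (f t')))
            = (PySem.Str.isIn t' u && !(s.contains (f t'))) := by
          intro t' ht'
          have hne : f t' ≠ f t := by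
            intro h; exact hft (h ▸ List.mem_map_of_mem ht')
          simp [List.contains_eq_mem, hne]
        rw [List.filter_congr hfc]
        have hin' : PySem.Chars.isIn t.toList u.toList = true := hin
        simp [hin', hc]
    · rw [if_neg hin, ih s hnd']
      have hin' : ¬ PySem.Chars.isIn t.toList u.toList = true := hin
      simp [hin']

-- once every renamed token is present, A's per-value step is the identity
theorem foldl_inner_fixed (vs : List String) (l : List String)
    (h : ∀ t ∈ lobeWorklist, nmF t ∈ l) :
    vs.foldl (fun lobes value =>
      lobeWorklist.foldl (fun a t =>
        if PySem.Str.isIn t (PySem.Str.upper value) then PySem.Set.add a (nmF t) else a) lobes) l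
      = l := by
  induction vs with
  | nil => rfl
  | cons v vs ih =>
    have hstep : lobeWorklist.foldl (fun a t =>
        if PySem.Str.isIn t (PySem.Str.upper v) then PySem.Set.add a (nmF t) else a) l = l := by
      rw [inner_char (PySem.Str.upper v) nmF lobeWorklist l (by decide)]
      have : lobeWorklist.filter
          (fun t => PySem.Str.isIn t (PySem.Str.upper v) && !(l.contains (nmF t))) = [] := by
        apply List.filter_eq_nil_iff.mpr
        intro t ht
        simp [List.contains_eq_mem, h t ht]
      rw [this]; simp
    simp only [List.foldl_cons, hstep]
    exact ih

theorem nmF_inj : ∀ x ∈ lobeWorklist, ∀ y ∈ lobeWorklist, nmF x = nmF y → x = y := by decide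

-- the worklist loop preserves: out has no duplicates and only grows by worklist elements
theorem loop_props : ∀ (vs out R : List String), out.Nodup → R.Nodup →
    (∀ t ∈ R, t ∉ out) →
    ((lobeLoop R out vs).Nodup ∧ ∀ t ∈ lobeLoop R out vs, t ∈ out ∨ t ∈ R) := by
  intro vs
  induction vs with
  | nil => intro out R h1 _ _; exact ⟨h1, fun t ht => Or.inl ht⟩
  | cons v vs ih =>
    intro out R h1 h2 h3
    simp only [lobeLoop]
    by_cases hre : R.filter (fun t => !(PySem.Str.isIn t (PySem.Str.upper v))) = []
    · rw [if_pos hre]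
      constructor
      · exact List.Nodup.append h1 (h2.filter _) (fun t ht h't => h3 t (List.mem_of_mem_filter h't) ht)
      · intro t ht
        rcases List.mem_append.mp ht with h | h
        · exact Or.inl h
        · exact Or.inr (List.mem_of_mem_filter h)
    · rw [if_neg hre]
      have := ih (out ++ R.filter (fun t => PySem.Str.isIn t (PySem.Str.upper v)))
        (R.filter (fun t => !(PySem.Str.isIn t (PySem.Str.upper v))))
        (List.Nodup.append h1 (h2.filter _) (fun t ht h't => h3 t (List.mem_of_mem_filter h't) ht))
        (h2.filter _)
        (by
          intro t ht hmem
          have htR := List.mem_of_mem_filter ht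
          have hnot := (List.mem_filter.mp ht).2
          rcases List.mem_append.mp hmem with h | h
          · exact h3 t htR h
          · have := (List.mem_filter.mp h).2
            simp at hnot this
            exact absurd this (by simp [hnot]))
      refine ⟨this.1, fun t ht => ?_⟩
      rcases this.2 t ht with h | h
      · rcases List.mem_append.mp h with h' | h'
        · exact Or.inl h'
        · exact Or.inr (List.mem_of_mem_filter h')
      · exact Or.inr (List.mem_of_mem_filter h)

theorem nmF_nodup : (lobeWorklist.map nmF).Nodup := by decide

theorem mem_map_nmF (out : List String) (hsub : ∀ x ∈ out, x ∈ lobeWorklist)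
    (t : String) (ht : t ∈ lobeWorklist) : nmF t ∈ out.map nmF ↔ t ∈ out := by
  constructor
  · intro h
    rcases List.mem_map.mp h with ⟨t', ht', he⟩
    exact (nmF_inj t' (hsub t' ht') t ht he) ▸ ht'
  · exact List.mem_map_of_mem

-- main invariant: A's value fold from state out.map nmF equals B's worklist loop, renamed
theorem loop_eq : ∀ (vs out : List String), out.Nodup → (∀ t ∈ out, t ∈ lobeWorklist) →
    vs.foldl (fun lobes value =>
      lobeWorklist.foldl (fun a t =>
        if PySem.Str.isIn t (PySem.Str.upper value) then PySem.Set.add a (nmF t) else a) lobes)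
      (out.map nmF)
      = (lobeLoop (lobeWorklist.filter (fun t => !(out.contains t))) out vs).map nmF := by
  intro vs
  induction vs with
  | nil => intro out _ _; rfl
  | cons v vs ih =>
    intro out hnd hsub
    set u := PySem.Str.upper v with hu
    set R := lobeWorklist.filter (fun t => !(out.contains t)) with hR
    have hstep : lobeWorklist.foldl (fun a t =>
        if PySem.Str.isIn t u then PySem.Set.add a (nmF t) else a) (out.map nmF)
        = (out ++ R.filter (fun t => PySem.Str.isIn t u)).map nmF := by
      rw [inner_char u nmF lobeWorklist (out.map nmF) nmF_nodup]
      rw [List.map_append]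
      congr 1
      rw [hR, List.filter_filter]
      apply congrArg
      apply List.filter_congr
      intro t ht
      have : (out.map nmF).contains (nmF t) = out.contains t := by
        simp only [List.contains_eq_mem]
        exact decide_eq_decide.mpr (mem_map_nmF out hsub t ht)
      rw [this, Bool.and_comm]
    set hit := R.filter (fun t => PySem.Str.isIn t u) with hhit
    have hR' : R.filter (fun t => !(PySem.Str.isIn t u))
        = lobeWorklist.filter (fun t => !((out ++ hit).contains t)) := by
      rw [hR, List.filter_filter]
      apply List.filter_congr
      intro t ht
      by_cases ho : t ∈ out
      · simp [List.contains_eq_mem, ho]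
      · by_cases hi : PySem.Str.isIn t u
        · have hi' : PySem.Chars.isIn t.toList u.toList = true := hi
          have : t ∈ hit := by
            rw [hhit, hR]
            exact List.mem_filter.mpr ⟨List.mem_filter.mpr ⟨ht, by simp [List.contains_eq_mem, ho]⟩, hi⟩
          simp [List.contains_eq_mem, ho, hi', this]
        · have hi' : ¬ PySem.Chars.isIn t.toList u.toList = true := hi
          have : t ∉ hit := fun hmem => hi (List.mem_filter.mp hmem).2
          simp [List.contains_eq_mem, ho, hi', this]
    have hnd' : (out ++ hit).Nodup := by
      have hwl : lobeWorklist.Nodup := by decide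
      refine List.Nodup.append hnd ((hwl.filter _).filter _) ?_
      intro t ht hto
      have := (List.mem_filter.mp (List.mem_of_mem_filter hto)).2
      simp [List.contains_eq_mem, ht] at this
    have hsub' : ∀ t ∈ out ++ hit, t ∈ lobeWorklist := by
      intro t ht
      rcases List.mem_append.mp ht with h | h
      · exact hsub t h
      · exact List.mem_of_mem_filter (List.mem_of_mem_filter h)
    simp only [List.foldl_cons, lobeLoop]
    rw [hstep]
    by_cases hempty : R.filter (fun t => !(PySem.Str.isIn t u)) = []
    · rw [if_pos hempty]
      apply foldl_inner_fixed
      intro t ht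
      apply List.mem_map_of_mem
      by_cases ho : t ∈ out
      · exact List.mem_append.mpr (Or.inl ho)
      · refine List.mem_append.mpr (Or.inr ?_)
        have htR : t ∈ R := by
          rw [hR]; exact List.mem_filter.mpr ⟨ht, by simp [List.contains_eq_mem, ho]⟩
        by_cases hi : PySem.Str.isIn t u
        · exact List.mem_filter.mpr ⟨htR, hi⟩
        · exfalso
          have : t ∈ R.filter (fun t => !(PySem.Str.isIn t u)) :=
            List.mem_filter.mpr ⟨htR, by exact (by exact eq_false_of_ne_true hi : PySem.Str.isIn t u = false) ▸ rfl⟩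
          rw [hempty] at this
          exact absurd this (List.not_mem_nil)
    · rw [if_neg hempty]
      rw [hR'] at hempty ⊢
      exact ih (out ++ hit) hnd' hsub'

-- set(l) is l itself when l has no duplicates
theorem ofList_self : ∀ (l : List String), l.Nodup → PySem.Set.ofList l = l := by
  have gen : ∀ (l s : List String), l.Nodup → (∀ x ∈ l, x ∉ s) →
      l.foldl PySem.Set.add s = s ++ l := by
    intro l
    induction l with
    | nil => intro s _ _; simp
    | cons x l ih =>
      intro s hnd hdis
      have hadd : PySem.Set.add s x = s ++ [x] := by
        simp [PySem.Set.add, PySem.Set.contains, List.contains_eq_mem, hdis x (by simp)]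
      simp only [List.foldl_cons, hadd]
      rw [ih (s ++ [x]) (List.nodup_cons.mp hnd).2]
      · simp
      · intro y hy
        simp only [List.mem_append, List.mem_singleton]
        rintro (h | h)
        · exact hdis y (by simp [hy]) h
        · exact (List.nodup_cons.mp hnd).1 (h ▸ hy)
  intro l h
  have := gen l [] h (by simp)
  simpa [PySem.Set.ofList] using this

-- ===== VERDICT (by name: the statement is the Claim_ definition above) =====
theorem lobe_tokens_py_spec : Claim_equal_lobe_tokens_py := by
  intro values _
  show lobe_tokens_py values = lobe_tokens_py_alt values
  have hprops := loop_props values [] lobeWorklist (by simp) (by decide) (by simp)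
  have hmapnd : ((lobeLoop lobeWorklist [] values).map nmF).Nodup := by
    refine List.Nodup.map_on ?_ hprops.1
    intro x hx y hy
    have hx' : x ∈ lobeWorklist := (hprops.2 x hx).resolve_left (by simp)
    have hy' : y ∈ lobeWorklist := (hprops.2 y hy).resolve_left (by simp)
    exact nmF_inj x hx' y hy'
  have h := loop_eq values [] (by simp) (by simp)
  have hfil : lobeWorklist.filter (fun t => !(([] : List String).contains t)) = lobeWorklist := by
    simp
  rw [hfil] at h
  show values.foldl (fun lobes value =>
      lobeWorklist.foldl (fun a t =>
        if PySem.Str.isIn t (PySem.Str.upper value) then PySem.Set.add a (nmF t) else a) lobes)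
      (([] : List String).map nmF)
    = PySem.Set.ofList ((lobeLoop lobeWorklist [] values).map nmF)
  rw [h, ofList_self _ hmapnd]
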